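-- pv_equiv track=rewrite | github.com/loning/mbook-binary | src/binaryuniverse/tests/test_T29_1.py | compute_max_run_length
-- ===== SOURCE A (Python) =====
-- from typing import List, Dict, Tuple, Any, Optional, Union
--
-- def compute_max_run_length(sequence: List[int], value: int) -> int:
--     """计算序列中特定值的最大连续长度"""
--     max_run = 0
--     current_run = 0
--
--     for item in sequence:
--         if item == value:
--             current_run += 1
--             max_run = max(max_run, current_run)
--         else:
--             current_run = 0
--
--     return max_run
-- ===== SOURCE B (Python) =====
-- def _runs(sequence):
--     """Split sequence into its maximal runs: list of (value, run_length)."""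
--     runs = []
--     i = 0
--     n = len(sequence)
--     while i < n:
--         j = i
--         while j < n and sequence[j] == sequence[i]:
--             j += 1
--         runs.append((sequence[i], j - i))
--         i = j
--     return runs
--
-- def compute_max_run_length(sequence, value):
--     best = 0
--     for v, n in _runs(sequence):
--         if v == value and n > best:
--             best = n
--     return best
-- ===== Notes on version B (the rewrite author's own statement) =====
-- stated objective: alternative
-- what changed: Replaces the running-counter-with-live-max single pass by a two-phase shape: first split the sequence into maximal (value, length) runs, then take the max length among the runs matching value (0 if none).
import Mathlib
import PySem

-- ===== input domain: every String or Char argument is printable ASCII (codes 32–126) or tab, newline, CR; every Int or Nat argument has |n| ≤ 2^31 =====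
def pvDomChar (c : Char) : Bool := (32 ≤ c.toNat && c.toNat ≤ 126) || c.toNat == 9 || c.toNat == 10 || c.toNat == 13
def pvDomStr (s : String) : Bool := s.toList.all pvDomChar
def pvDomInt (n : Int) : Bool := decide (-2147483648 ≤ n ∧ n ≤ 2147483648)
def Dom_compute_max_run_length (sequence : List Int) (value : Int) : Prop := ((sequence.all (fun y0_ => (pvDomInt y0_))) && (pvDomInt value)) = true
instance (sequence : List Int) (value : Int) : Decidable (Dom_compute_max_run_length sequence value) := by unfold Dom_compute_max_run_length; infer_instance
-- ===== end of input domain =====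

-- B replaces A's running-counter-with-live-max single pass by a two-phase shape
-- (split into maximal runs, then select the best matching run); objective: alternative.

-- ===== PORT A =====
-- for item in sequence: if item == value: current_run += 1; max_run = max(max_run, current_run)
--                       else: current_run = 0
def compute_max_run_length (sequence : List Int) (value : Int) : Int :=
  (sequence.foldl
    (fun (st : Int × Int) item =>
      if item = value then (max st.1 (st.2 + 1), st.2 + 1) else (st.1, 0))
    (0, 0)).1

-- ===== PORT B =====
-- _runs: the outer while peels one maximal run per step; the inner while
-- (j advancing past equal elements) is the takeWhile/dropWhile split, j - i = 1 + |takeWhile|.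
def pyRunsB (sequence : List Int) : List (Int × Int) :=
  match sequence with
  | [] => []
  | x :: xs =>
    (x, 1 + ((xs.takeWhile (fun y => y == x)).length : Int)) ::
      pyRunsB (xs.dropWhile (fun y => y == x))
termination_by sequence.length
decreasing_by
  simp only [List.length_cons]
  exact Nat.lt_succ_of_le (List.length_dropWhile_le _ _)

-- best = 0; for v, n in runs: if v == value and n > best: best = n
def compute_max_run_length_alt (sequence : List Int) (value : Int) : Int :=
  (pyRunsB sequence).foldl
    (fun best p => if p.1 = value ∧ p.2 > best then p.2 else best) 0

-- ===== PRECONDITION & SPEC =====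
def Spec_compute_max_run_length (sequence : List Int) (value : Int) (out : Int) : Prop := out = compute_max_run_length_alt sequence value
instance (sequence : List Int) (value : Int) (out : Int) : Decidable (Spec_compute_max_run_length sequence value out) := by unfold Spec_compute_max_run_length; infer_instance

-- ===== CLAIM (what is proved, stated in full; the proofs are below) =====
def Claim_equal_compute_max_run_length : Prop := ∀ (sequence : List Int) (value : Int), Dom_compute_max_run_length sequence value → Spec_compute_max_run_length sequence value (compute_max_run_length sequence value)

-- ===== LEMMAS AND PROOFS =====

-- A's loop over a block of elements all equal to `value`, starting with a live run of c ≤ m.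
theorem loopA_run (value : Int) (t : List Int) :
    ∀ (m c : Int), (∀ y ∈ t, y = value) → 0 ≤ c → c ≤ m →
    t.foldl (fun (st : Int × Int) item =>
        if item = value then (max st.1 (st.2 + 1), st.2 + 1) else (st.1, 0)) (m, c)
      = (max m (c + t.length), c + t.length) := by
  induction t with
  | nil => intro m c _ _ hcm; simp; omega
  | cons y ys ih =>
    intro m c hall hc hcm
    have hy : y = value := hall y (by simp)
    simp only [List.foldl_cons, hy, reduceIte]
    rw [ih (max m (c + 1)) (c + 1) (fun z hz => hall z (by simp [hz])) (by omega) (by omega)]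
    simp only [List.length_cons, Prod.mk.injEq]
    constructor <;> push_cast <;> omega

-- A's loop over a block of elements all different from `value`.
theorem loopA_norun (value : Int) (t : List Int) :
    ∀ (m : Int), (∀ y ∈ t, y ≠ value) →
    t.foldl (fun (st : Int × Int) item =>
        if item = value then (max st.1 (st.2 + 1), st.2 + 1) else (st.1, 0)) (m, 0)
      = (m, 0) := by
  induction t with
  | nil => intro m _; rfl
  | cons y ys ih =>
    intro m hall
    have hy : y ≠ value := hall y (by simp)
    simp only [List.foldl_cons, if_neg hy]
    exact ih m (fun z hz => hall z (by simp [hz]))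

-- The live run counter is irrelevant to max_run when the next element (if any) is not `value`.
theorem loopA_reset (value : Int) (r : List Int)
    (hhd : ∀ y, r.head? = some y → y ≠ value) (m c c' : Int) :
    (r.foldl (fun (st : Int × Int) item =>
        if item = value then (max st.1 (st.2 + 1), st.2 + 1) else (st.1, 0)) (m, c)).1
      = (r.foldl (fun (st : Int × Int) item =>
        if item = value then (max st.1 (st.2 + 1), st.2 + 1) else (st.1, 0)) (m, c')).1 := by
  cases r with
  | nil => rfl
  | cons y ys =>
    have hy : y ≠ value := hhd y rfl
    simp only [List.foldl_cons, if_neg hy]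

-- Main invariant: A's loop from (m, 0) computes B's run-selection fold started at m.
theorem loopA_eq_runs (value : Int) (l : List Int) :
    ∀ (m : Int), 0 ≤ m →
    (l.foldl (fun (st : Int × Int) item =>
        if item = value then (max st.1 (st.2 + 1), st.2 + 1) else (st.1, 0)) (m, 0)).1
      = (pyRunsB l).foldl (fun best p => if p.1 = value ∧ p.2 > best then p.2 else best) m := by
  induction l using pyRunsB.induct with
  | case1 => intro m _; simp [pyRunsB]
  | case2 x xs ih =>
    intro m hm
    have hsplit : xs.takeWhile (fun y => y == x) ++ xs.dropWhile (fun y => y == x) = xs :=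
      List.takeWhile_append_dropWhile
    set t := xs.takeWhile (fun y => y == x) with ht
    set r := xs.dropWhile (fun y => y == x) with hr
    have htall : ∀ y ∈ t, y = x := by
      intro y hy
      have := List.mem_takeWhile_imp hy
      simpa using this
    have hrhd : ∀ y, r.head? = some y → y ≠ x := by
      intro y hy
      have h := List.head?_dropWhile_not (fun y => y == x) xs
      rw [← hr, hy] at h
      simpa using h
    have hL : (0 : Int) ≤ (t.length : Int) := by positivity
    rw [show pyRunsB (x :: xs) = (x, 1 + (t.length : Int)) :: pyRunsB r from by rw [pyRunsB]]
    conv_lhs => rw [show x :: xs = (x :: t) ++ r by rw [List.cons_append, hsplit],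
                    List.foldl_append]
    by_cases hx : x = value
    · have htall' : ∀ y ∈ t, y = value := fun y hy => (htall y hy).trans hx
      have hstep : (x :: t).foldl (fun (st : Int × Int) item =>
          if item = value then (max st.1 (st.2 + 1), st.2 + 1) else (st.1, 0)) (m, 0)
          = (max m (1 + (t.length : Int)), 1 + (t.length : Int)) := by
        simp only [List.foldl_cons, hx, reduceIte]
        rw [loopA_run value t (max m (0 + 1)) (0 + 1) htall' (by omega) (by omega)]
        congr 1; omega
      rw [hstep]
      rw [loopA_reset value r (fun y hy => fun he => hrhd y hy (he.trans hx.symm)) _ _ 0]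
      rw [ih _ (by omega), List.foldl_cons]
      congr 1
      by_cases hgt : m < 1 + (t.length : Int)
      · rw [if_pos ⟨hx, hgt⟩]
        show max m (1 + (t.length : Int)) = 1 + (t.length : Int)
        omega
      · rw [if_neg (fun h => hgt h.2)]
        show max m (1 + (t.length : Int)) = m
        omega
    · have hnall : ∀ y ∈ x :: t, y ≠ value := by
        intro y hy
        rcases List.mem_cons.1 hy with h | h
        · simpa [h] using hx
        · rw [htall y h]; exact hx
      rw [loopA_norun value (x :: t) m hnall, ih m hm, List.foldl_cons]
      congr 1
      rw [if_neg (fun h => hx h.1)]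

-- ===== VERDICT (by name: the statement is the Claim_ definition above) =====
theorem compute_max_run_length_spec : Claim_equal_compute_max_run_length := by
  intro sequence value _
  show compute_max_run_length sequence value = compute_max_run_length_alt sequence value
  unfold compute_max_run_length compute_max_run_length_alt
  exact loopA_eq_runs value sequence 0 le_rfl
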